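-- pv_equiv track=rewrite | github.com/kapppa-joe/aoc2022 | solutions/day_09.py | trace_head_position
-- ===== SOURCE A (Python) =====
-- from typing import TypeAlias
--
-- Motion: TypeAlias = tuple[str, int]
--
-- Coord: TypeAlias = tuple[int, int]
--
-- def trace_head_position(
--     motions: list[Motion], start_pos: Coord = (0, 0)
-- ) -> list[Coord]:
--     pos = start_pos
--     position_record = [pos]
--     direction_delta = {
--         "U": (0, 1),
--         "D": (0, -1),
--         "L": (-1, 0),
--         "R": (1, 0),
--     }
--     for direction, steps in motions:
--         dx, dy = direction_delta[direction]
--         x0, y0 = pos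
--         position_record += [(x0 + dx * i, y0 + dy * i) for i in range(1, steps + 1)]
--         pos = position_record[-1]
--
--     return position_record
-- ===== SOURCE B (Python) =====
-- def trace_head_position(motions, start_pos=(0, 0)):
--     direction_delta = {
--         "U": (0, 1),
--         "D": (0, -1),
--         "L": (-1, 0),
--         "R": (1, 0),
--     }
--     deltas = [direction_delta[d] for d, steps in motions for _ in range(steps)]
--     record = [start_pos]
--     for dx, dy in deltas:
--         x, y = record[-1]
--         record.append((x + dx, y + dy))
--     return record
-- ===== Notes on version B (the rewrite author's own statement) =====
-- stated objective: idiomatic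
-- what changed: B first flattens the motions into a stream of unit deltas and then produces the path as one cumulative prefix scan, instead of A's per-motion closed-form multiplication with a base position reset after every motion.
import Mathlib
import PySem

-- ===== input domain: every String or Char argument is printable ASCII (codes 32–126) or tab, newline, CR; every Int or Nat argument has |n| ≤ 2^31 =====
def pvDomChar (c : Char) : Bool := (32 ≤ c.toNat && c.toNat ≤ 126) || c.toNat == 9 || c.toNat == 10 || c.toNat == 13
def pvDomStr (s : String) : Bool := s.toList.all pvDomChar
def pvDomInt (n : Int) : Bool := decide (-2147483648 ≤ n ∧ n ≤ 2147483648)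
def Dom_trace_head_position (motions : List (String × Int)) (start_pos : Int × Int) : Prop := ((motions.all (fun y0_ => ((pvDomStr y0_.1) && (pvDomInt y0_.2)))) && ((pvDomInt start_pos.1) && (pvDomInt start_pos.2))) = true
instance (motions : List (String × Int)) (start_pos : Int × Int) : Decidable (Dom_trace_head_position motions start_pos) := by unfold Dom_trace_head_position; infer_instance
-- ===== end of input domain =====

-- B replaces A's per-motion closed-form expansion (pos + i*delta, base reset after each
-- motion) by a two-phase build-then-scan: flatten all motions into a stream of unit
-- deltas, then one cumulative prefix scan.  Objective: idiomatic; same cost.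

-- the direction->delta dict, shared literal of both Pythons
def pvDirDelta : PySem.Dict String (Int × Int) :=
  PySem.Dict.ofList [("U", ((0 : Int), (1 : Int))), ("D", (0, -1)), ("L", (-1, 0)), ("R", (1, 0))]

-- ===== PORT A =====
-- one iteration of A's for-loop over (pos, position_record)
def pvAStep (st : (Int × Int) × List (Int × Int)) (m : String × Int) : (Int × Int) × List (Int × Int) :=
  let d := PySem.Dict.getD pvDirDelta m.1 (0, 0)   -- KeyError case excluded by Pre_
  let rec' := st.2 ++ (PySem.List.pyRange 1 (m.2 + 1) 1).map
    (fun i => (st.1.1 + d.1 * i, st.1.2 + d.2 * i))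
  ((PySem.List.pyGet? rec' (-1)).getD (0, 0), rec')   -- pos = position_record[-1] (record never empty)

def trace_head_position (motions : List (String × Int)) (start_pos : Int × Int) : List (Int × Int) :=
  (motions.foldl pvAStep (start_pos, [start_pos])).2

-- ===== PORT B =====
-- one iteration of B's scan loop: append record[-1] + delta
def pvBStep (out : List (Int × Int)) (d : Int × Int) : List (Int × Int) :=
  let last := (PySem.List.pyGet? out (-1)).getD (0, 0)
  out ++ [(last.1 + d.1, last.2 + d.2)]

def trace_head_position_alt (motions : List (String × Int)) (start_pos : Int × Int) : List (Int × Int) :=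
  let deltas := motions.flatMap
    (fun m => (PySem.List.pyRange 0 m.2 1).map (fun _ => PySem.Dict.getD pvDirDelta m.1 (0, 0)))
  deltas.foldl pvBStep [start_pos]

-- ===== PRECONDITION & SPEC =====
-- Pre_ excludes exactly the motions whose direction is not a key of the dict: there
-- both Pythons raise KeyError.
def Pre_trace_head_position (motions : List (String × Int)) (start_pos : Int × Int) : Prop :=
  ∀ m ∈ motions, m.1 = "U" ∨ m.1 = "D" ∨ m.1 = "L" ∨ m.1 = "R"
instance (motions : List (String × Int)) (start_pos : Int × Int) : Decidable (Pre_trace_head_position motions start_pos) := by unfold Pre_trace_head_position; infer_instance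
def pvWitness_trace_head_position : (List (String × Int)) × (Int × Int) := ([("R", 2), ("U", 1), ("L", 0)], (0, 0))

def Spec_trace_head_position (motions : List (String × Int)) (start_pos : Int × Int) (out : List (Int × Int)) : Prop := out = trace_head_position_alt motions start_pos
instance (motions : List (String × Int)) (start_pos : Int × Int) (out : List (Int × Int)) : Decidable (Spec_trace_head_position motions start_pos out) := by unfold Spec_trace_head_position; infer_instance

-- ===== CLAIM (what is proved, stated in full; the proofs are below) =====
def Claim_equal_trace_head_position : Prop := ∀ (motions : List (String × Int)) (start_pos : Int × Int), Dom_trace_head_position motions start_pos → Pre_trace_head_position motions start_pos → Spec_trace_head_position motions start_pos (trace_head_position motions start_pos)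

-- ===== LEMMAS AND PROOFS =====

-- the positions a segment of k unit steps d from pos contributes
def pvSegList (k : Nat) (d pos : Int × Int) : List (Int × Int) :=
  (List.range k).map (fun i : Nat => (pos.1 + d.1 * ((i : Int) + 1), pos.2 + d.2 * ((i : Int) + 1)))

theorem pvLastSeg (k : Nat) (d pos : Int × Int) (rec : List (Int × Int))
    (h : rec.getLast? = some pos) :
    (rec ++ pvSegList k d pos).getLast? = some (pos.1 + d.1 * (k : Int), pos.2 + d.2 * (k : Int)) := by
  cases k with
  | zero => simpa [pvSegList] using h
  | succ m =>
    simp only [pvSegList, List.range_succ, List.map_append, List.map_cons, List.map_nil,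
      ← List.append_assoc, List.getLast?_concat, Option.some.injEq, Prod.mk.injEq]
    push_cast
    constructor <;> ring

-- scanning k copies of delta d from a record whose last element is pos
theorem pvSeg (k : Nat) (d pos : Int × Int) (rec : List (Int × Int))
    (h : rec.getLast? = some pos) :
    (List.replicate k d).foldl pvBStep rec = rec ++ pvSegList k d pos := by
  induction k with
  | zero => simp [pvSegList]
  | succ n ih =>
    rw [List.replicate_succ', List.foldl_append, ih, List.foldl_cons, List.foldl_nil]
    unfold pvBStep
    rw [PySem.List.pyGet?_neg_one, pvLastSeg n d pos rec h]
    simp only [Option.getD_some]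
    rw [List.append_assoc]
    congr 1
    simp only [pvSegList, List.range_succ, List.map_append, List.map_cons, List.map_nil]
    congr 1
    simp only [List.cons.injEq, and_true, Prod.mk.injEq]
    constructor <;> ring

-- A's per-motion segment equals B's scan over that motion's delta copies
theorem pvSegEq (n : Int) (d pos : Int × Int) (rec : List (Int × Int))
    (h : rec.getLast? = some pos) :
    rec ++ (PySem.List.pyRange 1 (n + 1) 1).map (fun i => (pos.1 + d.1 * i, pos.2 + d.2 * i))
      = ((PySem.List.pyRange 0 n 1).map (fun _ => d)).foldl pvBStep rec := by
  have hrep : (PySem.List.pyRange 0 n 1).map (fun _ => d) = List.replicate n.toNat d := by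
    rw [List.map_const']
    simp [PySem.List.length_pyRange_one]
  have hA : (PySem.List.pyRange 1 (n + 1) 1).map (fun i => (pos.1 + d.1 * i, pos.2 + d.2 * i))
      = pvSegList n.toNat d pos := by
    rw [PySem.List.pyRange_one, List.map_map, show (n + 1 - 1).toNat = n.toNat by omega, pvSegList]
    apply List.map_congr_left
    intro i _
    simp only [Function.comp_apply, Prod.mk.injEq]
    constructor <;> ring
  rw [hrep, pvSeg n.toNat d pos rec h, hA]

-- main invariant: A's loop from (pos, rec) equals B's scan of the flattened deltas from rec
theorem pvMain (motions : List (String × Int)) :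
    ∀ (pos : Int × Int) (rec : List (Int × Int)), rec.getLast? = some pos →
    (motions.foldl pvAStep (pos, rec)).2
      = (motions.flatMap
          (fun m => (PySem.List.pyRange 0 m.2 1).map
            (fun _ => PySem.Dict.getD pvDirDelta m.1 (0, 0)))).foldl pvBStep rec := by
  induction motions with
  | nil => intro pos rec _; simp
  | cons m ms ih =>
    intro pos rec h
    rw [List.flatMap_cons, List.foldl_append, List.foldl_cons]
    set d := PySem.Dict.getD pvDirDelta m.1 (0, 0) with hd
    have hseg := pvSegEq m.2 d pos rec h
    rw [← hseg]
    have hA : (PySem.List.pyRange 1 (m.2 + 1) 1).map (fun i => (pos.1 + d.1 * i, pos.2 + d.2 * i))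
        = pvSegList m.2.toNat d pos := by
      rw [PySem.List.pyRange_one, List.map_map, show (m.2 + 1 - 1).toNat = m.2.toNat by omega,
        pvSegList]
      apply List.map_congr_left
      intro i _
      simp only [Function.comp_apply, Prod.mk.injEq]
      constructor <;> ring
    show (ms.foldl pvAStep (pvAStep (pos, rec) m)).2 = _
    have hstep : pvAStep (pos, rec) m
        = ((pos.1 + d.1 * (m.2.toNat : Int), pos.2 + d.2 * (m.2.toNat : Int)),
           rec ++ pvSegList m.2.toNat d pos) := by
      simp only [pvAStep, ← hd, hA, PySem.List.pyGet?_neg_one,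
        pvLastSeg m.2.toNat d pos rec h, Option.getD_some]
    rw [hstep, ih _ _ (pvLastSeg m.2.toNat d pos rec h), hA]

-- ===== VERDICT (by name: the statement is the Claim_ definition above) =====
theorem trace_head_position_spec : Claim_equal_trace_head_position := by
  intro motions start_pos _dom _pre
  unfold Spec_trace_head_position trace_head_position trace_head_position_alt
  exact pvMain motions start_pos [start_pos] (by simp)
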